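-- pv_equiv track=rewrite | github.com/tsani/coding-cat-public | count-repeat/mutation_3.py | countRepeat
-- ===== SOURCE A (Python) =====
-- def countRepeat(a, b):
--     '''
--         Incorrect order of variable assignment
--     '''
--     count = 0
--     previous_is_b = False
--     repeat_lock = False
--
--     for i in a:
--         if i == b:
--             previous_is_b = True #Mutated position of variable being assigned a value
--             if previous_is_b == True and repeat_lock == False:
--                 count += 1
--                 repeat_lock = True
--         else:
--             repeat_lock = False
--             previous_is_b = False
--
--     return count
-- ===== SOURCE B (Python) =====
-- def countRepeat(a, b):
--     collapsed = []
--     for x in a: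
--         if not collapsed or collapsed[-1] != x:
--             collapsed.append(x)
--     return collapsed.count(b)
-- ===== Notes on version B (the rewrite author's own statement) =====
-- stated objective: alternative
-- what changed: Replaces A's previous_is_b/repeat_lock state machine with two stages: first collapse adjacent duplicates into a run-representative list (groupby-style), then count occurrences of b in that list with list.count.
import Mathlib
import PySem

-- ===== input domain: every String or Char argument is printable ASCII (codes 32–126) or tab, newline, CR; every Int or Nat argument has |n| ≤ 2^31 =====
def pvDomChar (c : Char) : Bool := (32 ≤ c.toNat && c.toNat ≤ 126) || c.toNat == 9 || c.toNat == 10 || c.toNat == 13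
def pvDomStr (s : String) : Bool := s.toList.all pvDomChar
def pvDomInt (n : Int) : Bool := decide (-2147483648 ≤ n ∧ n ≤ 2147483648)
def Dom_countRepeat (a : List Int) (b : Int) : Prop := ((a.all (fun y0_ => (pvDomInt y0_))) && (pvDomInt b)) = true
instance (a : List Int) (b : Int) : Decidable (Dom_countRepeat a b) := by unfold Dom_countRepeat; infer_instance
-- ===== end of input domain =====

-- B replaces A's two-flag state machine by two stages: collapse adjacent duplicates into run representatives, then count b among them; alternative decomposition, same cost.

-- ===== PORT A =====
-- one loop iteration of A: state = (count, previous_is_b, repeat_lock)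
def countRepeatStep (b : Int) (st : Int × Bool × Bool) (i : Int) : Int × Bool × Bool :=
  if i == b then
    -- previous_is_b := true (assigned before the test, as in the mutated source)
    if true == true && st.2.2 == false then (st.1 + 1, true, true)
    else (st.1, true, st.2.2)
  else (st.1, false, false)

def countRepeat (a : List Int) (b : Int) : Int :=
  (a.foldl (countRepeatStep b) (0, false, false)).1

-- ===== PORT B =====
-- one loop iteration of B's first stage: append x unless it repeats the last run representative
def collapseStep (acc : List Int) (x : Int) : List Int :=
  match acc.getLast? with
  | none => acc ++ [x]
  | some l => if l ≠ x then acc ++ [x] else acc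

def countRepeat_alt (a : List Int) (b : Int) : Int :=
  let collapsed := a.foldl collapseStep []
  (PySem.List.count collapsed b : Int)

-- ===== PRECONDITION & SPEC =====
def Spec_countRepeat (a : List Int) (b : Int) (out : Int) : Prop := out = countRepeat_alt a b
instance (a : List Int) (b : Int) (out : Int) : Decidable (Spec_countRepeat a b out) := by unfold Spec_countRepeat; infer_instance

-- ===== CLAIM =====
def Claim_equal_countRepeat : Prop := ∀ (a : List Int) (b : Int), Dom_countRepeat a b → Spec_countRepeat a b (countRepeat a b)

-- ===== LEMMAS AND PROOFS =====

-- run starts of b in l given that the previous element equalled b iff p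
def runStarts (b : Int) (p : Bool) : List Int → Nat
  | [] => 0
  | x :: xs => (if x == b && !p then 1 else 0) + runStarts b (x == b) xs

theorem countRepeat_A_key (b : Int) : ∀ (l : List Int) (c : Int) (p : Bool),
    (l.foldl (countRepeatStep b) (c, p, p)).1 = c + (runStarts b p l : Int) := by
  intro l
  induction l with
  | nil => intro c p; simp [runStarts]
  | cons x xs ih =>
    intro c p
    by_cases h : x = b
    · by_cases hp : p = true <;>
        simp [countRepeatStep, runStarts, h, hp, ih] <;> ring
    · have hx : (x == b) = false := by simp [h]
      by_cases hp : p = true <;>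
        simp [countRepeatStep, runStarts, hx, hp, ih]

theorem countRepeat_B_key (b : Int) : ∀ (l : List Int) (acc : List Int) (y : Int),
    acc.getLast? = some y →
    PySem.List.count (l.foldl collapseStep acc) b =
      PySem.List.count acc b + runStarts b (y == b) l := by
  intro l
  induction l with
  | nil => intro acc y _; simp [runStarts]
  | cons x xs ih =>
    intro acc y hy
    by_cases h : y = x
    · have hstep : collapseStep acc x = acc := by
        simp [collapseStep, hy, h]
      simp only [List.foldl_cons, hstep]
      rw [ih acc y hy]
      subst h
      simp [runStarts]
    · have hstep : collapseStep acc x = acc ++ [x] := by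
        simp [collapseStep, hy, h]
      simp only [List.foldl_cons, hstep]
      rw [ih (acc ++ [x]) x (by simp)]
      have hcount : PySem.List.count (acc ++ [x]) b =
          PySem.List.count acc b + (if x == b then 1 else 0) := by
        by_cases hxb : x = b <;> simp [PySem.List.count, hxb]
      rw [hcount]
      have hrs : runStarts b (y == b) (x :: xs) =
          (if x == b && !(y == b) then 1 else 0) + runStarts b (x == b) xs := rfl
      rw [hrs]
      by_cases hxb : x = b
      · have hyb : (y == b) = false := by
          simp only [beq_eq_false_iff_ne]
          exact fun hc => h (hc.trans hxb.symm)
        simp [hxb, hyb]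
        omega
      · simp [hxb]

-- ===== VERDICT =====
theorem countRepeat_spec : Claim_equal_countRepeat := by
  intro a b _
  unfold Spec_countRepeat countRepeat countRepeat_alt
  cases a with
  | nil => simp [PySem.List.count]
  | cons x xs =>
    have hstep : collapseStep [] x = [x] := by simp [collapseStep]
    simp only [List.foldl_cons, hstep]
    by_cases hxb : x = b
    · have h1 : countRepeatStep b (0, false, false) x = (1, true, true) := by
        simp [countRepeatStep, hxb]
      rw [h1, countRepeat_A_key b xs 1 true, countRepeat_B_key b xs [x] x (by simp)]
      have hc : PySem.List.count [x] b = 1 := by simp [PySem.List.count, hxb]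
      have hxb' : (x == b) = true := by simp [hxb]
      rw [hc, hxb']; push_cast; ring
    · have h1 : countRepeatStep b (0, false, false) x = (0, false, false) := by
        simp [countRepeatStep, hxb]
      rw [h1, countRepeat_A_key b xs 0 false, countRepeat_B_key b xs [x] x (by simp)]
      have hc : PySem.List.count [x] b = 0 := by simp [PySem.List.count, hxb]
      have hxb' : (x == b) = false := by simp [hxb]
      rw [hc, hxb']; simp
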